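-- pv_equiv track=rewrite | github.com/GuillaumeLaplante-Anfossi/Poissons | GeneratingDiagonalsViaShift/diagonals_via_shift.py | strong_complimentary_pair
-- ===== SOURCE A (Python) =====
-- def strong_complimentary_pair(v):
--     '''
--     returns the strong complimentary pair of a given vertex
--     '''
--     merge_desc = [[v[0]]]
--     merge_asc = [[v[0]]]
--
--     prev = v[0]
--     for x in v[1:]:
--         if x>prev:
--             merge_asc[-1].append(x)
--             merge_desc.append([x])
--         if x<prev:
--             merge_desc[-1].append(x)
--             merge_asc.append([x])
--         prev = x
--
--     #Sort the subpartitions so in standard form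
--     merge_asc = [sorted(x) for x in merge_asc]
--     merge_desc = [sorted(x) for x in merge_desc]
--
--     return merge_desc, merge_asc
-- ===== SOURCE B (Python) =====
-- def strong_complimentary_pair(v):
--     '''
--     returns the strong complimentary pair of a given vertex
--     '''
--     desc, asc = [], []
--     cur_d, cur_a = [v[0]], [v[0]]
--     prev = v[0]
--     for x in v[1:]:
--         if x > prev:
--             desc.append(cur_d)
--             cur_d = [x]
--             cur_a.append(x)
--         elif x < prev:
--             asc.append(cur_a)
--             cur_a = [x]
--             cur_d = [x] + cur_d   # prepend: descending run kept in ascending (standard) form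
--         prev = x
--     desc.append(cur_d)
--     asc.append(cur_a)
--     return desc, asc
-- ===== Notes on version B (the rewrite author's own statement) =====
-- stated objective: faster
-- what changed: B keeps the current ascending run (already sorted) and builds the current descending run by prepending so it is kept in sorted form, removing A's final sorted() pass over every run; single pass, no sorting.
import Mathlib
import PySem

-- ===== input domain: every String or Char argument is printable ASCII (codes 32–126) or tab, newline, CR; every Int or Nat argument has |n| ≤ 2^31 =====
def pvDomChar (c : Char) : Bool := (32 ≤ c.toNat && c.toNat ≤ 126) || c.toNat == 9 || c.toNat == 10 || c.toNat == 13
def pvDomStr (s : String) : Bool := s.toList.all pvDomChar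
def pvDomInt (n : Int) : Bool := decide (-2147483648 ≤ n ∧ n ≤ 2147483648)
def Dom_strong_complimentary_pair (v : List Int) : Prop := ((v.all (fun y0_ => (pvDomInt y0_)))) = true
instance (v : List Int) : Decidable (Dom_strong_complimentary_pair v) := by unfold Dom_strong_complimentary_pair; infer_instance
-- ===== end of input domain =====

-- B removes A's final sorted() pass: ascending runs are already sorted and descending runs
-- are kept in sorted form by prepending; one pass, no sorting.

-- ===== PORT A =====
-- list[-1].append(x)
def aAppendLast (l : List (List Int)) (x : Int) : List (List Int) :=
  match l with
  | [] => []
  | [r] => [r ++ [x]]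
  | r :: rs => r :: aAppendLast rs x

-- the for-loop of A over v[1:], state (merge_desc, merge_asc, prev)
def aLoop (md ma : List (List Int)) (prev : Int) : List Int → List (List Int) × List (List Int)
  | [] => (md, ma)
  | x :: rest =>
    let p1 := if x > prev then (md ++ [[x]], aAppendLast ma x) else (md, ma)
    let p2 := if x < prev then (aAppendLast p1.1 x, p1.2 ++ [[x]]) else p1
    aLoop p2.1 p2.2 x rest

def strong_complimentary_pair (v : List Int) : List (List Int) × List (List Int) :=
  match v with
  | [] => ([], [])   -- Python raises IndexError here; excluded by Pre_
  | v0 :: t =>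
    let r := aLoop [[v0]] [[v0]] v0 t
    (r.1.map (fun x => PySem.List.sorted x (fun y => y) false),
     r.2.map (fun x => PySem.List.sorted x (fun y => y) false))

-- ===== PORT B =====
-- the for-loop of B, state (prev, cur_d, cur_a, desc, asc)
def bLoop (prev : Int) (cur_d cur_a : List Int) (desc asc : List (List Int)) :
    List Int → List (List Int) × List (List Int)
  | [] => (desc ++ [cur_d], asc ++ [cur_a])
  | x :: rest =>
    if x > prev then
      bLoop x [x] (cur_a ++ [x]) (desc ++ [cur_d]) asc rest
    else if x < prev then
      bLoop x ([x] ++ cur_d) [x] desc (asc ++ [cur_a]) rest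
    else
      bLoop x cur_d cur_a desc asc rest

def strong_complimentary_pair_alt (v : List Int) : List (List Int) × List (List Int) :=
  match v with
  | [] => ([], [])   -- Python raises IndexError here; excluded by Pre_
  | v0 :: t => bLoop v0 [v0] [v0] [] [] t

-- ===== PRECONDITION & SPEC =====
-- A raises IndexError on the empty list (v[0]); only that input is excluded.
def Pre_strong_complimentary_pair (v : List Int) : Prop := v ≠ []
instance (v : List Int) : Decidable (Pre_strong_complimentary_pair v) := by
  unfold Pre_strong_complimentary_pair; infer_instance

def pvWitness_strong_complimentary_pair : List Int := [2, 1, 3]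

def Spec_strong_complimentary_pair (v : List Int) (out : List (List Int) × List (List Int)) : Prop := out = strong_complimentary_pair_alt v
instance (v : List Int) (out : List (List Int) × List (List Int)) : Decidable (Spec_strong_complimentary_pair v out) := by unfold Spec_strong_complimentary_pair; infer_instance

-- ===== CLAIM (what is proved, stated in full; the proofs are below) =====
def Claim_equal_strong_complimentary_pair : Prop := ∀ (v : List Int), Dom_strong_complimentary_pair v → Pre_strong_complimentary_pair v → Spec_strong_complimentary_pair v (strong_complimentary_pair v)

-- ===== LEMMAS AND PROOFS =====

def mapSort (l : List (List Int)) : List (List Int) :=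
  l.map (fun x => PySem.List.sorted x (fun y => y) false)

theorem aAppendLast_append (l : List (List Int)) (r : List Int) (x : Int) :
    aAppendLast (l ++ [r]) x = l ++ [r ++ [x]] := by
  induction l with
  | nil => rfl
  | cons h t ih =>
    cases t with
    | nil => simp [aAppendLast]
    | cons h2 t2 => simpa [aAppendLast] using ih

theorem sorted_of_chain_lt (l : List Int) (h : l.Pairwise (· < ·)) :
    PySem.List.sorted l (fun y => y) false = l := by
  exact PySem.List.sorted_eq_self_of_pairwise l (fun y => y)
    (h.imp (fun hab => le_of_lt hab))

theorem sorted_of_chain_gt (l : List Int) (h : l.Pairwise (· > ·)) :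
    PySem.List.sorted l (fun y => y) false = l.reverse := by
  exact PySem.List.sorted_eq_of_perm_of_pairwise_lt l l.reverse (fun y => y)
    (l.reverse_perm) (by simpa [List.pairwise_reverse] using h)

-- Invariant relating A's loop state to B's:
--   md = mdi ++ [ld], ma = mai ++ [la]; B carries desc = mapSort mdi, asc = mapSort mai,
--   cur_d = ld.reverse, cur_a = la; ld strictly decreasing ending at prev, la strictly
--   increasing ending at prev.
theorem loop_eq (rest : List Int) :
    ∀ (prev : Int) (mdi mai : List (List Int)) (ld la : List Int),
      ld.Pairwise (· > ·) → la.Pairwise (· < ·) →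
      ld.getLast? = some prev → la.getLast? = some prev →
      (mapSort (aLoop (mdi ++ [ld]) (mai ++ [la]) prev rest).1,
       mapSort (aLoop (mdi ++ [ld]) (mai ++ [la]) prev rest).2)
      = bLoop prev ld.reverse la (mapSort mdi) (mapSort mai) rest := by
  induction rest with
  | nil =>
    intro prev mdi mai ld la hld hla _ _
    simp [aLoop, bLoop, mapSort, sorted_of_chain_gt ld hld, sorted_of_chain_lt la hla]
  | cons x rest ih =>
    intro prev mdi mai ld la hld hla hldl hlal
    rcases lt_trichotomy x prev with hx | hx | hx
    · -- x < prev : A appends x to last desc run, opens new asc run [x]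
      have hA : aLoop (mdi ++ [ld]) (mai ++ [la]) prev (x :: rest)
          = aLoop (mdi ++ [ld ++ [x]]) ((mai ++ [la]) ++ [[x]]) x rest := by
        simp [aLoop, not_lt.mpr (le_of_lt hx), hx, aAppendLast_append]
      have hB : bLoop prev ld.reverse la (mapSort mdi) (mapSort mai) (x :: rest)
          = bLoop x ([x] ++ ld.reverse) [x] (mapSort mdi) (mapSort mai ++ [la]) rest := by
        simp [bLoop, not_lt.mpr (le_of_lt hx), hx]
      rw [hA, hB]
      have hlast : ∀ y ∈ ld, x < y := by
        intro y hy
        rcases List.getLast?_eq_some_iff.mp hldl with ⟨l', hl'⟩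
        subst hl'
        rcases List.mem_append.mp hy with h1 | h1
        · have := (List.pairwise_append.mp hld).2.2 y h1 prev (by simp)
          exact lt_trans hx this
        · simp at h1; omega
      have hchain : (ld ++ [x]).Pairwise (· > ·) := by
        rw [List.pairwise_append]
        exact ⟨hld, by simp, by intro a ha b hb; simp at hb; subst hb; exact hlast a ha⟩
      have := ih x mdi (mai ++ [la]) (ld ++ [x]) [x] hchain (by simp)
        (by simp) (by simp)
      simpa [mapSort, sorted_of_chain_lt la hla, List.append_assoc] using this
    · -- x = prev : nothing changes
      subst hx
      have hA : aLoop (mdi ++ [ld]) (mai ++ [la]) x (x :: rest)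
          = aLoop (mdi ++ [ld]) (mai ++ [la]) x rest := by
        simp [aLoop]
      have hB : bLoop x ld.reverse la (mapSort mdi) (mapSort mai) (x :: rest)
          = bLoop x ld.reverse la (mapSort mdi) (mapSort mai) rest := by
        simp [bLoop]
      rw [hA, hB]
      exact ih x mdi mai ld la hld hla hldl hlal
    · -- x > prev : A appends x to last asc run, opens new desc run [x]
      have hA : aLoop (mdi ++ [ld]) (mai ++ [la]) prev (x :: rest)
          = aLoop ((mdi ++ [ld]) ++ [[x]]) (mai ++ [la ++ [x]]) x rest := by
        simp [aLoop, hx, not_lt.mpr (le_of_lt hx), aAppendLast_append]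
      have hB : bLoop prev ld.reverse la (mapSort mdi) (mapSort mai) (x :: rest)
          = bLoop x [x] (la ++ [x]) (mapSort mdi ++ [ld.reverse]) (mapSort mai) rest := by
        simp [bLoop, hx]
      rw [hA, hB]
      have hlast : ∀ y ∈ la, y < x := by
        intro y hy
        rcases List.getLast?_eq_some_iff.mp hlal with ⟨l', hl'⟩
        subst hl'
        rcases List.mem_append.mp hy with h1 | h1
        · have := (List.pairwise_append.mp hla).2.2 y h1 prev (by simp)
          exact lt_trans this hx
        · simp at h1; omega
      have hchain : (la ++ [x]).Pairwise (· < ·) := by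
        rw [List.pairwise_append]
        exact ⟨hla, by simp, by intro a ha b hb; simp at hb; subst hb; exact hlast a ha⟩
      have := ih x (mdi ++ [ld]) mai [x] (la ++ [x]) (by simp) hchain
        (by simp) (by simp)
      simpa [mapSort, sorted_of_chain_gt ld hld, List.append_assoc] using this

-- ===== VERDICT (by name: the statement is the Claim_ definition above) =====
theorem strong_complimentary_pair_spec : Claim_equal_strong_complimentary_pair := by
  intro v _ hpre
  unfold Spec_strong_complimentary_pair
  match v with
  | [] => exact absurd rfl hpre
  | v0 :: t =>
    have := loop_eq t v0 [] [] [v0] [v0] (by simp) (by simp) (by simp) (by simp)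
    simp only [strong_complimentary_pair, strong_complimentary_pair_alt]
    simp only [mapSort, List.nil_append, List.map_nil] at this
    rw [Prod.ext_iff] at this ⊢
    simpa using this
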